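-- pv_equiv track=rewrite | github.com/hydrusnetwork/hydrus | hydrus/ClientManagers.py | CollapseTagSiblingPairs
-- ===== SOURCE A (Python) =====
-- def CollapseTagSiblingPairs( groups_of_pairs ):
--
--     # This now takes 'groups' of pairs in descending order of precedence
--
--     # This allows us to mandate that local tags take precedence
--
--     # a pair is invalid if:
--     # it causes a loop (a->b, b->c, c->a)
--     # there is already a relationship for the 'bad' sibling (a->b, a->c)
--
--     valid_chains = {}
--
--     for pairs in groups_of_pairs:
--
--         pairs = list( pairs )
--
--         pairs.sort()
--
--         for ( bad, good ) in pairs: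
--
--             if bad == good:
--
--                 # a->a is a loop!
--
--                 continue
--
--
--             if bad not in valid_chains:
--
--                 we_have_a_loop = False
--
--                 current_best = good
--
--                 while current_best in valid_chains:
--
--                     current_best = valid_chains[ current_best ]
--
--                     if current_best == bad:
--
--                         we_have_a_loop = True
--
--                         break
--
--
--
--                 if not we_have_a_loop:
--
--                     valid_chains[ bad ] = good
--
--
--
--
--
--     # now we collapse the chains, turning:
--     # a->b, b->c ... e->f
--     # into
--     # a->f, b->f ... e->f
--
--     siblings = {}
--
--     for ( bad, good ) in list( valid_chains.items() ):
--
--         # given a->b, want to find f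
--
--         if good in siblings:
--
--             # f already calculated and added
--
--             best = siblings[ good ]
--
--         else:
--
--             # we don't know f for this chain, so let's figure it out
--
--             current_best = good
--
--             while current_best in valid_chains:
--
--                 current_best = valid_chains[ current_best ] # pursue endpoint f
--
--
--             best = current_best
--
--
--         # add a->f
--         siblings[ bad ] = best
--
--
--     return siblings
-- ===== SOURCE B (Python) =====
-- def CollapseTagSiblingPairs( groups_of_pairs ):
--
--     # Union-find with path compression: 'parent' holds the same bad->good edges as the
--     # original's valid_chains (so key insertion order is identical), but find() flattens
--     # the paths it walks, and the final mapping is simply find(bad) for each key.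
--
--     parent = {}
--
--     def find( x ):
--
--         path = []
--
--         while x in parent:
--
--             path.append( x )
--
--             x = parent[ x ]
--
--
--         for y in path:
--
--             parent[ y ] = x
--
--
--         return x
--
--
--     for pairs in groups_of_pairs:
--
--         for ( bad, good ) in sorted( pairs ):
--
--             if bad != good and bad not in parent and find( good ) != bad:
--
--                 parent[ bad ] = good
--
--
--
--
--     return { bad : find( bad ) for bad in parent }
-- ===== Notes on version B (the rewrite author's own statement) =====
-- stated objective: alternative
-- what changed: Replaces A's repeated chain re-walking (a loop-detection walk per pair plus a second collapse pass with a memo dict keyed by 'good') by one union-find-style parent map with path compression: find() flattens every chain it walks, and the final mapping is simply find(bad) for each key.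
import Mathlib
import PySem

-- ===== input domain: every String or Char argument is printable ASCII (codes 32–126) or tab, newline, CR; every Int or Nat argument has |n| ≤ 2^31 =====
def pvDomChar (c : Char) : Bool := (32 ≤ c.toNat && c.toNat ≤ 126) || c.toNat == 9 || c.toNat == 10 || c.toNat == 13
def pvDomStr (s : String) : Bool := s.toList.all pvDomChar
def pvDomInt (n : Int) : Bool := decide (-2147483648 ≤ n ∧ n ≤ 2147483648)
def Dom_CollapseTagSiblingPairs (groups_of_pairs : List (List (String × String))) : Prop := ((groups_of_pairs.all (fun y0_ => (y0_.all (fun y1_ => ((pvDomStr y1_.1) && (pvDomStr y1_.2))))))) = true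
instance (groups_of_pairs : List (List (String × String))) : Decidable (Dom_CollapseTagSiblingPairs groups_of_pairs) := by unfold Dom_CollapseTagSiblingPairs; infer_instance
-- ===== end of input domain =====

-- B replaces A's repeated chain re-walking and memoised collapse pass by a single path-compressed union-find parent map (alternative algorithm, same result).


abbrev pvD : Type := PySem.Dict String String

-- ===== PORT A =====
-- A's inner 'while current_best in valid_chains' loop-detection walk; the Nat fuel only
-- makes the recursion structural (valid_chains stays acyclic, so size+1 steps always suffice).
def pvAWalk (chains : pvD) (bad : String) : String → Nat → Bool
  | _, 0 => false
  | cur, fuel+1 =>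
    match chains.get? cur with
    | none => false
    | some nxt => if nxt = bad then true else pvAWalk chains bad nxt fuel

-- A's second-phase 'while current_best in valid_chains' endpoint walk (same fuel remark).
def pvAEnd (chains : pvD) : String → Nat → String
  | cur, 0 => cur
  | cur, fuel+1 =>
    match chains.get? cur with
    | none => cur
    | some nxt => pvAEnd chains nxt fuel

-- the body of A's first loop, for one (bad, good) pair
def pvAStep (chains : pvD) (p : String × String) : pvD :=
  if p.1 = p.2 then chains
  else if chains.contains p.1 then chains
  else if pvAWalk chains p.1 p.2 (chains.size + 1) then chains
  else chains.insert p.1 p.2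

-- A's second loop: collapse the chains into 'siblings', memoising on 'good'
def pvAPhase2 (chains : pvD) : pvD :=
  chains.items.foldl
    (fun siblings bg =>
      let best :=
        match siblings.get? bg.2 with
        | some b => b
        | none => pvAEnd chains bg.2 (chains.size + 1)
      siblings.insert bg.1 best)
    PySem.Dict.empty

def CollapseTagSiblingPairs (groups_of_pairs : List (List (String × String))) : List (String × String) :=
  let valid_chains :=
    groups_of_pairs.foldl
      (fun chains pairs =>
        (PySem.List.sorted2 pairs (fun q => q.1) (fun q => q.2)).foldl pvAStep chains)
      PySem.Dict.empty
  (pvAPhase2 valid_chains).items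

-- ===== PORT B =====
-- Source B's find(): walk to the root collecting the path, then point every path node at the
-- root (path compression); fuel as above.
def pvBPath (parent : pvD) : String → Nat → List String × String
  | x, 0 => ([], x)
  | x, fuel+1 =>
    match parent.get? x with
    | none => ([], x)
    | some nxt =>
      let rest := pvBPath parent nxt fuel
      (x :: rest.1, rest.2)

def pvBFind (parent : pvD) (x : String) : String × pvD :=
  let pr := pvBPath parent x (parent.size + 1)
  (pr.2, pr.1.foldl (fun d y => d.insert y pr.2) parent)

-- the body of Source B's loop, for one (bad, good) pair
def pvBStep (parent : pvD) (p : String × String) : pvD :=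
  if p.1 = p.2 then parent
  else if parent.contains p.1 then parent
  else
    let fr := pvBFind parent p.2
    if fr.1 = p.1 then fr.2 else fr.2.insert p.1 p.2

def CollapseTagSiblingPairs_alt (groups_of_pairs : List (List (String × String))) : List (String × String) :=
  let parent :=
    groups_of_pairs.foldl
      (fun par pairs =>
        (PySem.List.sorted2 pairs (fun q => q.1) (fun q => q.2)).foldl pvBStep par)
      PySem.Dict.empty
  ((parent.keys.foldl
      (fun st bad =>
        let fr := pvBFind st.1 bad
        (fr.2, st.2.insert bad fr.1))
      (parent, PySem.Dict.empty)).2).items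

-- ===== PRECONDITION & SPEC =====
def Spec_CollapseTagSiblingPairs (groups_of_pairs : List (List (String × String))) (out : List (String × String)) : Prop := out = CollapseTagSiblingPairs_alt groups_of_pairs
instance (groups_of_pairs : List (List (String × String))) (out : List (String × String)) : Decidable (Spec_CollapseTagSiblingPairs groups_of_pairs out) := by unfold Spec_CollapseTagSiblingPairs; infer_instance

-- ===== CLAIM (what is proved, stated in full; the proofs are below) =====
def Claim_equal_CollapseTagSiblingPairs : Prop := ∀ (groups_of_pairs : List (List (String × String))), Dom_CollapseTagSiblingPairs groups_of_pairs → Spec_CollapseTagSiblingPairs groups_of_pairs (CollapseTagSiblingPairs groups_of_pairs)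

-- ===== LEMMAS AND PROOFS =====

-- rk is a ranking witnessing that d's pointer graph is acyclic (every edge strictly drops)
def pvRk (d : pvD) (rk : String → Nat) : Prop :=
  ∀ k v, d.get? k = some v → rk v < rk k

-- the endpoint of the chain from x (the ports' canonical fuel)
def pvRoot (d : pvD) (x : String) : String :=
  pvAEnd d x (d.size + 1)

-- simulation invariant between A's valid_chains and B's (compressed) parent
def pvInv (c p : pvD) : Prop :=
  c.keys = p.keys ∧ c.keys.Nodup ∧ (∃ rk, pvRk c rk) ∧ (∃ rk, pvRk p rk) ∧
    ∀ x, pvRoot c x = pvRoot p x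

theorem pvSize (d : pvD) : d.size = d.keys.length := by
  simp [PySem.Dict.size, PySem.Dict.keys]

theorem pvMemKeys (d : pvD) {x : String} {v : String} (h : d.get? x = some v) : x ∈ d.keys := by
  have hc : d.contains x = true := by
    cases hc : d.contains x
    · rw [← PySem.Dict.get?_eq_none_iff_contains] at hc; simp [h] at hc
    · rfl
  exact (PySem.Dict.contains_iff_mem_keys d x).mp hc

theorem pvNotMemKeys (d : pvD) {x : String} (h : x ∉ d.keys) : d.get? x = none := by
  cases hg : d.get? x with
  | none => rfl
  | some v => exact absurd (pvMemKeys d hg) h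

theorem pvContainsFalse (d : pvD) {x : String} (h : x ∉ d.keys) : d.contains x = false := by
  cases hc : d.contains x
  · rfl
  · exact absurd ((PySem.Dict.contains_iff_mem_keys d x).mp hc) h

theorem pvContainsTrue (d : pvD) {x : String} (h : x ∈ d.keys) : d.contains x = true :=
  (PySem.Dict.contains_iff_mem_keys d x).mpr h

theorem pvAEnd_none (d : pvD) {x : String} (h : d.get? x = none) (F : Nat) :
    pvAEnd d x F = x := by
  cases F <;> simp [pvAEnd, h]

theorem pvAEnd_some (d : pvD) {x n : String} (h : d.get? x = some n) (F : Nat) :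
    pvAEnd d x (F+1) = pvAEnd d n F := by
  simp [pvAEnd, h]

theorem pvBPath_none (d : pvD) {x : String} (h : d.get? x = none) (F : Nat) :
    pvBPath d x F = ([], x) := by
  cases F <;> simp [pvBPath, h]

theorem pvBPath_some (d : pvD) {x n : String} (h : d.get? x = some n) (F : Nat) :
    pvBPath d x (F+1) = (x :: (pvBPath d n F).1, (pvBPath d n F).2) := by
  simp [pvBPath, h]

theorem pvAEnd_path (d : pvD) : ∀ (F : Nat) (x : String), pvAEnd d x F = (pvBPath d x F).2 := by
  intro F
  induction F with
  | zero => intro x; simp [pvAEnd, pvBPath]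
  | succ F ih =>
    intro x
    cases hg : d.get? x with
    | none => rw [pvAEnd_none d hg, pvBPath_none d hg]
    | some n => rw [pvAEnd_some d hg, pvBPath_some d hg, ih]

-- the structural facts about a walk under an acyclicity ranking
theorem pvPathQ (d : pvD) (rk : String → Nat) (hrk : pvRk d rk) :
    ∀ (F : Nat) (x : String),
      ((pvBPath d x F).1.Pairwise (fun a b => rk b < rk a)) ∧
      (∀ y ∈ (pvBPath d x F).1, y ∈ d.keys) ∧
      (∀ y ∈ (pvBPath d x F).1, rk (pvBPath d x F).2 < rk y) ∧
      (∀ y ∈ (pvBPath d x F).1, rk y ≤ rk x) ∧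
      rk (pvBPath d x F).2 ≤ rk x := by
  intro F
  induction F with
  | zero => intro x; simp [pvBPath]
  | succ F ih =>
    intro x
    cases hg : d.get? x with
    | none => rw [pvBPath_none d hg]; simp
    | some n =>
      rw [pvBPath_some d hg]
      obtain ⟨ihpw, ihmem, ihend, ihbound, ihendle⟩ := ih n
      have hnx : rk n < rk x := hrk x n hg
      refine ⟨?_, ?_, ?_, ?_, ?_⟩
      · refine List.Pairwise.cons ?_ ihpw
        intro y hy; exact lt_of_le_of_lt (ihbound y hy) hnx
      · intro y hy
        rcases List.mem_cons.mp hy with h | h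
        · subst h; exact pvMemKeys d hg
        · exact ihmem y h
      · intro y hy
        rcases List.mem_cons.mp hy with h | h
        · subst h; exact lt_of_le_of_lt ihendle hnx
        · exact ihend y h
      · intro y hy
        rcases List.mem_cons.mp hy with h | h
        · subst h; exact le_refl _
        · exact le_trans (ihbound y h) (le_of_lt hnx)
      · exact le_trans ihendle (le_of_lt hnx)

theorem pvPathNodup (d : pvD) (rk : String → Nat) (hrk : pvRk d rk) (F : Nat) (x : String) :
    (pvBPath d x F).1.Nodup := by
  have h := (pvPathQ d rk hrk F x).1
  exact h.imp (fun {a b} hlt => by intro he; subst he; exact absurd hlt (lt_irrefl _))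

theorem pvPathFull (d : pvD) :
    ∀ (F : Nat) (x : String), d.get? ((pvBPath d x F).2) ≠ none → (pvBPath d x F).1.length = F := by
  intro F
  induction F with
  | zero => intro x _; simp [pvBPath]
  | succ F ih =>
    intro x h
    cases hg : d.get? x with
    | none => rw [pvBPath_none d hg] at h ⊢; simp at h; exact absurd hg h
    | some n =>
      rw [pvBPath_some d hg] at h ⊢
      simp only [List.length_cons]
      rw [ih n h]

theorem pvPathShort (d : pvD) (F : Nat) (x : String)
    (h : (pvBPath d x F).1.length < F) : d.get? ((pvBPath d x F).2) = none := by
  by_cases hn : d.get? ((pvBPath d x F).2) = none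
  · exact hn
  · exact absurd (pvPathFull d F x hn) (by omega)

theorem pvPathLe (d : pvD) (rk : String → Nat) (hrk : pvRk d rk) (_hnd : d.keys.Nodup)
    (F : Nat) (x : String) : (pvBPath d x F).1.length ≤ d.keys.length := by
  have hsub : (pvBPath d x F).1 ⊆ d.keys := fun y hy => (pvPathQ d rk hrk F x).2.1 y hy
  exact (List.subperm_of_subset (pvPathNodup d rk hrk F x) hsub).length_le

theorem pvEndNone (d : pvD) (rk : String → Nat) (hrk : pvRk d rk) (hnd : d.keys.Nodup)
    (x : String) : d.get? (pvAEnd d x (d.keys.length + 1)) = none := by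
  rw [pvAEnd_path]
  exact pvPathShort d _ x (by have := pvPathLe d rk hrk hnd (d.keys.length + 1) x; omega)

theorem pvEndNone' (d : pvD) (rk : String → Nat) (hrk : pvRk d rk) (_hnd : d.keys.Nodup)
    {x n : String} (hx : d.get? x = some n) :
    d.get? (pvAEnd d n d.keys.length) = none := by
  rw [pvAEnd_path]
  apply pvPathShort
  have hxnot : x ∉ (pvBPath d n d.keys.length).1 := by
    intro hmem
    have h1 := (pvPathQ d rk hrk d.keys.length n).2.2.2.1 x hmem
    have h2 := hrk x n hx
    omega
  have hnodup : (x :: (pvBPath d n d.keys.length).1).Nodup :=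
    List.Nodup.cons hxnot (pvPathNodup d rk hrk _ n)
  have hsub : (x :: (pvBPath d n d.keys.length).1) ⊆ d.keys := by
    intro y hy
    rcases List.mem_cons.mp hy with h | h
    · subst h; exact pvMemKeys d hx
    · exact (pvPathQ d rk hrk _ n).2.1 y h
  have := (List.subperm_of_subset hnodup hsub).length_le
  simp only [List.length_cons] at this
  omega

theorem pvEndStable (d : pvD) :
    ∀ (F : Nat) (x : String) (G : Nat), d.get? (pvAEnd d x F) = none → F ≤ G →
      pvAEnd d x G = pvAEnd d x F := by
  intro F
  induction F with
  | zero =>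
    intro x G h _
    simp only [pvAEnd] at h ⊢
    exact pvAEnd_none d h G
  | succ F ih =>
    intro x G h hle
    cases hg : d.get? x with
    | none => rw [pvAEnd_none d hg, pvAEnd_none d hg]
    | some n =>
      cases G with
      | zero => omega
      | succ G =>
        rw [pvAEnd_some d hg] at h ⊢
        rw [pvAEnd_some d hg]
        exact ih n G h (by omega)

theorem pvRootKeyless (d : pvD) {x : String} (h : d.get? x = none) : pvRoot d x = x :=
  pvAEnd_none d h _

theorem pvRootEnd (d : pvD) (rk : String → Nat) (hrk : pvRk d rk) (hnd : d.keys.Nodup)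
    (x : String) : d.get? (pvRoot d x) = none := by
  unfold pvRoot
  rw [pvSize]
  exact pvEndNone d rk hrk hnd x

theorem pvRootStep (d : pvD) (rk : String → Nat) (hrk : pvRk d rk) (hnd : d.keys.Nodup)
    {x n : String} (hx : d.get? x = some n) : pvRoot d x = pvRoot d n := by
  unfold pvRoot
  rw [pvSize]
  rw [pvAEnd_some d hx]
  exact (pvEndStable d d.keys.length n (d.keys.length + 1) (pvEndNone' d rk hrk hnd hx)
    (by omega)).symm

-- every node on a walk's path has the same root as the start
theorem pvPathRoot (d : pvD) (rk : String → Nat) (hrk : pvRk d rk) (hnd : d.keys.Nodup) :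
    ∀ (F : Nat) (s y : String), y ∈ (pvBPath d s F).1 →
      pvRoot d y = pvRoot d ((pvBPath d s F).2) := by
  intro F
  induction F with
  | zero => intro s y hy; simp [pvBPath] at hy
  | succ F ih =>
    intro s y hy
    cases hg : d.get? s with
    | none => rw [pvBPath_none d hg] at hy; simp at hy
    | some n =>
      rw [pvBPath_some d hg] at hy ⊢
      simp only
      rcases List.mem_cons.mp hy with h | h
      · subst h
        rw [pvRootStep d rk hrk hnd hg]
        cases F with
        | zero => simp [pvBPath]
        | succ F =>
          cases hgn : d.get? n with
          | none => rw [pvBPath_none d hgn]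
          | some m =>
            have : n ∈ (pvBPath d n (F+1)).1 := by rw [pvBPath_some d hgn]; exact List.mem_cons_self
            exact ih n n this
      · exact ih n y h

-- ---- path compression ----
def pvCPath (d : pvD) (s : String) : List String := (pvBPath d s (d.size + 1)).1
def pvCEnd (d : pvD) (s : String) : String := (pvBPath d s (d.size + 1)).2
def pvComp (d : pvD) (s : String) : pvD :=
  (pvCPath d s).foldl (fun t y => t.insert y (pvCEnd d s)) d

theorem pvCEnd_eq (d : pvD) (s : String) : pvCEnd d s = pvRoot d s := by
  rw [pvRoot, pvAEnd_path]; rfl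

theorem pvBFind_eq (d : pvD) (s : String) : pvBFind d s = (pvCEnd d s, pvComp d s) := rfl

theorem pvGetFoldl (r : String) :
    ∀ (l : List String) (d : pvD) (z : String),
      ((l.foldl (fun t y => t.insert y r) d).get? z) = if z ∈ l then some r else d.get? z := by
  intro l
  induction l with
  | nil => intro d z; simp
  | cons y l ih =>
    intro d z
    simp only [List.foldl_cons]
    rw [ih]
    by_cases hz : z ∈ l
    · simp [hz]
    · by_cases hzy : z = y
      · subst hzy; simp [hz]
      · simp [hz, hzy, PySem.Dict.get?_insert]

theorem pvKeysFoldl (r : String) :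
    ∀ (l : List String) (d : pvD), (∀ y ∈ l, y ∈ d.keys) →
      (l.foldl (fun t y => t.insert y r) d).keys = d.keys := by
  intro l
  induction l with
  | nil => intro d _; simp
  | cons y l ih =>
    intro d hmem
    simp only [List.foldl_cons]
    have hk : (d.insert y r).keys = d.keys :=
      PySem.Dict.keys_insert_of_contains d r (pvContainsTrue d (hmem y List.mem_cons_self))
    rw [ih (d.insert y r) (by intro z hz; rw [hk]; exact hmem z (List.mem_cons_of_mem _ hz)), hk]

theorem pvComp_get? (d : pvD) (s z : String) :
    (pvComp d s).get? z = if z ∈ pvCPath d s then some (pvCEnd d s) else d.get? z :=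
  pvGetFoldl _ _ d z

theorem pvComp_keys (d : pvD) (rk : String → Nat) (hrk : pvRk d rk) (s : String) :
    (pvComp d s).keys = d.keys := by
  apply pvKeysFoldl
  intro y hy
  exact (pvPathQ d rk hrk (d.size + 1) s).2.1 y hy

theorem pvComp_rk (d : pvD) (rk : String → Nat) (hrk : pvRk d rk) (s : String) :
    pvRk (pvComp d s) rk := by
  intro k v h
  rw [pvComp_get?] at h
  by_cases hk : k ∈ pvCPath d s
  · simp only [hk, if_true] at h
    cases h
    exact (pvPathQ d rk hrk (d.size + 1) s).2.2.1 k hk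
  · simp only [hk, if_false] at h
    exact hrk k v h

theorem pvComp_root (d : pvD) (rk : String → Nat) (hrk : pvRk d rk) (hnd : d.keys.Nodup)
    (s : String) : ∀ x, pvRoot (pvComp d s) x = pvRoot d x := by
  have hkeys : (pvComp d s).keys = d.keys := pvComp_keys d rk hrk s
  have hnd' : (pvComp d s).keys.Nodup := by rw [hkeys]; exact hnd
  have hrk' : pvRk (pvComp d s) rk := pvComp_rk d rk hrk s
  have hendnone : d.get? (pvCEnd d s) = none := by
    rw [pvCEnd_eq]; exact pvRootEnd d rk hrk hnd s
  have hendnotpath : pvCEnd d s ∉ pvCPath d s := by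
    intro hmem
    have := (pvPathQ d rk hrk (d.size + 1) s).2.2.1 _ hmem
    exact lt_irrefl _ this
  have hend' : (pvComp d s).get? (pvCEnd d s) = none := by
    rw [pvComp_get?]; simp [hendnotpath, hendnone]
  have main : ∀ (N : Nat) (x : String), rk x < N → pvRoot (pvComp d s) x = pvRoot d x := by
    intro N
    induction N with
    | zero => intro x hx; omega
    | succ N ih =>
      intro x hx
      by_cases hp : x ∈ pvCPath d s
      · have hgx : (pvComp d s).get? x = some (pvCEnd d s) := by
          rw [pvComp_get?]; simp [hp]
        rw [pvRootStep (pvComp d s) rk hrk' hnd' hgx, pvRootKeyless (pvComp d s) hend']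
        have h1 : pvRoot d x = pvRoot d (pvCEnd d s) := by
          have := pvPathRoot d rk hrk hnd (d.size + 1) s x hp
          rw [this]; rfl
        rw [h1, pvRootKeyless d hendnone]
      · cases hgx : d.get? x with
        | none =>
          have hgx' : (pvComp d s).get? x = none := by rw [pvComp_get?]; simp [hp, hgx]
          rw [pvRootKeyless _ hgx', pvRootKeyless d hgx]
        | some v =>
          have hgx' : (pvComp d s).get? x = some v := by rw [pvComp_get?]; simp [hp, hgx]
          rw [pvRootStep (pvComp d s) rk hrk' hnd' hgx', pvRootStep d rk hrk hnd hgx]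
          exact ih v (by have := hrk x v hgx; omega)
  intro x
  exact main (rk x + 1) x (by omega)

-- ---- inserting a fresh, non-looping edge ----
def pvS (d : pvD) (g : String) : List String := pvCPath d g ++ [pvCEnd d g]

def pvRk2 (d : pvD) (rk : String → Nat) (g : String) : String → Nat :=
  fun x => if x ∈ pvS d g then rk x else rk x + rk g + 1

theorem pvS_mem_good (d : pvD) (g : String) : g ∈ pvS d g := by
  unfold pvS pvCPath pvCEnd
  cases hg : d.get? g with
  | none => rw [pvBPath_none d hg]; simp
  | some n => rw [pvBPath_some d hg]; simp

theorem pvPathClosed (d : pvD) :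
    ∀ (F : Nat) (s : String), d.get? ((pvBPath d s F).2) = none →
      ∀ y ∈ (pvBPath d s F).1, ∀ v, d.get? y = some v →
        v ∈ (pvBPath d s F).1 ∨ v = (pvBPath d s F).2 := by
  intro F
  induction F with
  | zero => intro s _ y hy; simp [pvBPath] at hy
  | succ F ih =>
    intro s hend y hy v hv
    cases hg : d.get? s with
    | none => rw [pvBPath_none d hg] at hy; simp at hy
    | some n =>
      rw [pvBPath_some d hg] at hend hy ⊢
      simp only at hend ⊢
      rcases List.mem_cons.mp hy with h | h
      · subst h
        rw [hv] at hg; cases hg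
        cases F with
        | zero =>
          right
          simp [pvBPath]
        | succ F =>
          cases hgn : d.get? v with
          | none => right; rw [pvBPath_none d hgn]
          | some m =>
            left
            rw [pvBPath_some d hgn]
            simp
      · rcases ih n hend y h v hv with h' | h'
        · left; exact List.mem_cons_of_mem _ h'
        · right; exact h'

theorem pvS_closed (d : pvD) (rk : String → Nat) (hrk : pvRk d rk) (hnd : d.keys.Nodup)
    (g : String) {x v : String} (hx : x ∈ pvS d g) (hv : d.get? x = some v) : v ∈ pvS d g := by
  have hend : d.get? ((pvBPath d g (d.size + 1)).2) = none := by
    have := pvRootEnd d rk hrk hnd g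
    rw [pvRoot, pvAEnd_path] at this
    exact this
  unfold pvS at hx ⊢
  rcases List.mem_append.mp hx with h | h
  · rcases pvPathClosed d (d.size + 1) g hend x h v hv with h' | h'
    · exact List.mem_append.mpr (Or.inl h')
    · exact List.mem_append.mpr (Or.inr (by simp [pvCEnd, h']))
  · simp only [List.mem_singleton] at h
    subst h
    unfold pvCEnd at hv
    rw [hend] at hv; cases hv

theorem pvS_not_bad (d : pvD) (rk : String → Nat) (hrk : pvRk d rk) {g bad : String}
    (hbad : bad ∉ d.keys) (hloop : pvRoot d g ≠ bad) : bad ∉ pvS d g := by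
  intro hmem
  unfold pvS at hmem
  rcases List.mem_append.mp hmem with h | h
  · exact hbad ((pvPathQ d rk hrk (d.size + 1) g).2.1 bad h)
  · simp only [List.mem_singleton] at h
    exact hloop (by rw [← pvCEnd_eq]; exact h.symm)

theorem pvInsRk (d : pvD) (rk : String → Nat) (hrk : pvRk d rk) (hnd : d.keys.Nodup)
    {bad good : String} (hbad : bad ∉ d.keys) (_hne : bad ≠ good)
    (hloop : pvRoot d good ≠ bad) :
    pvRk (d.insert bad good) (pvRk2 d rk good) := by
  intro k v h
  rw [PySem.Dict.get?_insert] at h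
  by_cases hkb : k = bad
  · rw [if_pos hkb] at h
    injection h with hgv
    subst hgv
    rw [hkb]
    have h1 : bad ∉ pvS d good := pvS_not_bad d rk hrk hbad hloop
    have h2 : good ∈ pvS d good := pvS_mem_good d good
    simp only [pvRk2, if_pos h2, if_neg h1]
    omega
  · rw [if_neg hkb] at h
    have hbase : rk v < rk k := hrk k v h
    simp only [pvRk2]
    by_cases hkS : k ∈ pvS d good
    · have hvS : v ∈ pvS d good := pvS_closed d rk hrk hnd good hkS h
      simp only [if_pos hkS, if_pos hvS]; omega
    · by_cases hvS : v ∈ pvS d good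
      · simp only [if_neg hkS, if_pos hvS]; omega
      · simp only [if_neg hkS, if_neg hvS]; omega

theorem pvInsRoot (d : pvD) (rk : String → Nat) (hrk : pvRk d rk) (hnd : d.keys.Nodup)
    {bad good : String} (hbad : bad ∉ d.keys) (hne : bad ≠ good)
    (hloop : pvRoot d good ≠ bad) :
    ∀ x, pvRoot (d.insert bad good) x =
      if pvRoot d x = bad then pvRoot d good else pvRoot d x := by
  have hkeys : (d.insert bad good).keys = d.keys ++ [bad] :=
    PySem.Dict.keys_insert_of_not_contains d good (pvContainsFalse d hbad)
  have hnd' : (d.insert bad good).keys.Nodup := by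
    rw [hkeys]
    have hdis : ∀ a ∈ d.keys, a ≠ bad := fun a ha hab => hbad (hab ▸ ha)
    simp only [List.nodup_append, List.nodup_singleton, true_and]
    refine ⟨hnd, ?_⟩
    intro a ha
    simp [hdis a ha]
  have hrk' : pvRk (d.insert bad good) (pvRk2 d rk good) := pvInsRk d rk hrk hnd hbad hne hloop
  have hbadnone : d.get? bad = none := pvNotMemKeys d hbad
  have main : ∀ (N : Nat) (x : String), pvRk2 d rk good x < N →
      pvRoot (d.insert bad good) x = if pvRoot d x = bad then pvRoot d good else pvRoot d x := by
    intro N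
    induction N with
    | zero => intro x hx; omega
    | succ N ih =>
      intro x hx
      cases hgx : (d.insert bad good).get? x with
      | none =>
        rw [PySem.Dict.get?_insert] at hgx
        by_cases hxb : x = bad
        · simp [hxb] at hgx
        · simp only [if_neg hxb] at hgx
          rw [pvRootKeyless _ (by rw [PySem.Dict.get?_insert]; simp [hxb, hgx]),
            pvRootKeyless d hgx]
          simp [hxb]
      | some v =>
        have hstep := pvRootStep (d.insert bad good) (pvRk2 d rk good) hrk' hnd' hgx
        have hlt : pvRk2 d rk good v < pvRk2 d rk good x := hrk' x v hgx
        have hIH := ih v (by omega)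
        rw [PySem.Dict.get?_insert] at hgx
        by_cases hxb : x = bad
        · subst hxb
          rw [if_pos rfl] at hgx
          cases hgx
          rw [hstep, hIH]
          rw [pvRootKeyless d hbadnone]
          simp [hloop]
        · simp only [if_neg hxb] at hgx
          rw [hstep, hIH, pvRootStep d rk hrk hnd hgx]
  intro x
  exact main (pvRk2 d rk good x + 1) x (by omega)

-- A's loop-detection walk finds a loop exactly when the chain from cur ends at bad
theorem pvWalkIff (d : pvD) {bad : String} (hbad : d.get? bad = none) :
    ∀ (F : Nat) (cur : String), cur ≠ bad →
      (pvAWalk d bad cur F = true ↔ pvAEnd d cur F = bad) := by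
  intro F
  induction F with
  | zero =>
    intro cur hcur
    simp [pvAWalk, pvAEnd, hcur]
  | succ F ih =>
    intro cur hcur
    cases hg : d.get? cur with
    | none =>
      simp [pvAWalk, pvAEnd, hg, hcur]
    | some nxt =>
      by_cases hnb : nxt = bad
      · subst hnb
        simp [pvAWalk, pvAEnd, hg, pvAEnd_none d hbad]
      · simp only [pvAWalk, pvAEnd, hg]
        rw [if_neg hnb]
        exact ih nxt hnb

-- ---- phase-1 simulation ----
theorem pvStepInv (c p : pvD) (q : String × String) (h : pvInv c p) :
    pvInv (pvAStep c q) (pvBStep p q) := by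
  obtain ⟨hkeys, hnd, ⟨rkc, hrkc⟩, ⟨rkp, hrkp⟩, hroot⟩ := h
  have hndp : p.keys.Nodup := by rw [← hkeys]; exact hnd
  unfold pvAStep pvBStep
  by_cases h12 : q.1 = q.2
  · simp only [if_pos h12]
    exact ⟨hkeys, hnd, ⟨rkc, hrkc⟩, ⟨rkp, hrkp⟩, hroot⟩
  · simp only [if_neg h12]
    by_cases hmem : q.1 ∈ c.keys
    · rw [pvContainsTrue c hmem, pvContainsTrue p (by rw [← hkeys]; exact hmem)]
      simp only [if_pos]
      exact ⟨hkeys, hnd, ⟨rkc, hrkc⟩, ⟨rkp, hrkp⟩, hroot⟩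
    · have hmemp : q.1 ∉ p.keys := by rw [← hkeys]; exact hmem
      rw [pvContainsFalse c hmem, pvContainsFalse p hmemp]
      simp only [Bool.false_eq_true, if_false, pvBFind_eq]
      have hbadc : c.get? q.1 = none := pvNotMemKeys c hmem
      have hwalk : pvAWalk c q.1 q.2 (c.size + 1) = true ↔ pvRoot c q.2 = q.1 :=
        pvWalkIff c hbadc (c.size + 1) q.2 (fun he => h12 he.symm)
      have hfind : pvCEnd p q.2 = pvRoot p q.2 := pvCEnd_eq p q.2
      -- compressed p package
      have hckeys : (pvComp p q.2).keys = p.keys := pvComp_keys p rkp hrkp q.2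
      have hcrk : pvRk (pvComp p q.2) rkp := pvComp_rk p rkp hrkp q.2
      have hcroot : ∀ x, pvRoot (pvComp p q.2) x = pvRoot p x :=
        pvComp_root p rkp hrkp hndp q.2
      by_cases hloop : pvRoot c q.2 = q.1
      · -- loop: A leaves chains, B only compresses
        rw [if_pos (hwalk.mpr hloop), if_pos (by rw [hfind, ← hroot]; exact hloop)]
        refine ⟨by rw [hkeys, hckeys], hnd, ⟨rkc, hrkc⟩, ⟨rkp, hcrk⟩, ?_⟩
        intro x; rw [hroot x, ← hcroot x]
      · -- no loop: both insert the edge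
        have hloop' : pvCEnd p q.2 ≠ q.1 := by rw [hfind, ← hroot]; exact hloop
        rw [if_neg (by rw [hwalk]; exact hloop), if_neg hloop']
        have hbadcomp : q.1 ∉ (pvComp p q.2).keys := by rw [hckeys]; exact hmemp
        have hloopc : pvRoot (pvComp p q.2) q.2 ≠ q.1 := by rw [hcroot, ← hroot]; exact hloop
        have hkeys1 : (c.insert q.1 q.2).keys = c.keys ++ [q.1] :=
          PySem.Dict.keys_insert_of_not_contains c q.2 (pvContainsFalse c hmem)
        have hkeys2 : ((pvComp p q.2).insert q.1 q.2).keys = (pvComp p q.2).keys ++ [q.1] :=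
          PySem.Dict.keys_insert_of_not_contains _ q.2 (pvContainsFalse _ hbadcomp)
        refine ⟨?_, ?_, ?_, ?_, ?_⟩
        · rw [hkeys1, hkeys2, hckeys, hkeys]
        · rw [hkeys1]
          have hdis : ∀ a ∈ c.keys, a ≠ q.1 := fun a ha hab => hmem (hab ▸ ha)
          simp only [List.nodup_append, List.nodup_singleton, true_and]
          refine ⟨hnd, ?_⟩
          intro a ha
          simp [hdis a ha]
        · exact ⟨pvRk2 c rkc q.2, pvInsRk c rkc hrkc hnd hmem h12 hloop⟩
        · exact ⟨pvRk2 (pvComp p q.2) rkp q.2,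
            pvInsRk _ rkp hcrk (by rw [hckeys]; exact hndp) hbadcomp h12 hloopc⟩
        · intro x
          rw [pvInsRoot c rkc hrkc hnd hmem h12 hloop x,
            pvInsRoot _ rkp hcrk (by rw [hckeys]; exact hndp) hbadcomp h12 hloopc x]
          simp only [hcroot, hroot]

theorem pvFoldPairs (l : List (String × String)) :
    ∀ (c p : pvD), pvInv c p → pvInv (l.foldl pvAStep c) (l.foldl pvBStep p) := by
  induction l with
  | nil => intro c p h; exact h
  | cons q l ih =>
    intro c p h
    simp only [List.foldl_cons]
    exact ih _ _ (pvStepInv c p q h)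

theorem pvFoldGroups (gs : List (List (String × String))) :
    ∀ (c p : pvD), pvInv c p →
      pvInv
        (gs.foldl (fun chains pairs =>
          (PySem.List.sorted2 pairs (fun q => q.1) (fun q => q.2)).foldl pvAStep chains) c)
        (gs.foldl (fun par pairs =>
          (PySem.List.sorted2 pairs (fun q => q.1) (fun q => q.2)).foldl pvBStep par) p) := by
  induction gs with
  | nil => intro c p h; exact h
  | cons g gs ih =>
    intro c p h
    simp only [List.foldl_cons]
    exact ih _ _ (pvFoldPairs _ c p h)

theorem pvInvEmpty : pvInv PySem.Dict.empty PySem.Dict.empty := by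
  refine ⟨rfl, ?_, ⟨fun _ => 0, ?_⟩, ⟨fun _ => 0, ?_⟩, fun _ => rfl⟩
  · simp [PySem.Dict.keys_empty]
  · intro k v h; rw [PySem.Dict.get?_empty] at h; cases h
  · intro k v h; rw [PySem.Dict.get?_empty] at h; cases h

-- ---- phase 2, A side ----
theorem pvPhase2Aux (c : pvD) (rk : String → Nat) (hrk : pvRk c rk) (hnd : c.keys.Nodup) :
    ∀ (l : List (String × String)) (sib : pvD),
      (∀ k v, sib.get? k = some v → v = pvRoot c k) →
      (∀ q ∈ l, q ∈ c.items) →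
      ((sib.keys ++ l.map (fun q => q.1)).Nodup) →
      (l.foldl
        (fun siblings bg =>
          let best :=
            match siblings.get? bg.2 with
            | some b => b
            | none => pvAEnd c bg.2 (c.size + 1)
          siblings.insert bg.1 best)
        sib).items = sib.items ++ l.map (fun q => (q.1, pvRoot c q.2)) := by
  intro l
  induction l with
  | nil => intro sib _ _ _; simp
  | cons q l ih =>
    intro sib hmemo hitems hnodup
    have hfresh : q.1 ∉ sib.keys := by
      intro hq
      exact (List.disjoint_of_nodup_append hnodup) hq (by simp)
    have hbest :
        (match sib.get? q.2 with
          | some b => b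
          | none => pvAEnd c q.2 (c.size + 1)) = pvRoot c q.2 := by
      cases hg : sib.get? q.2 with
      | none => rfl
      | some b => exact hmemo q.2 b hg
    have hcq : c.get? q.1 = some q.2 :=
      PySem.Dict.get?_of_mem_items c (by rw [Prod.mk.eta]; exact hitems q List.mem_cons_self) hnd
    have hrootq : pvRoot c q.2 = pvRoot c q.1 := (pvRootStep c rk hrk hnd hcq).symm
    have hitems' : (sib.insert q.1 (pvRoot c q.2)).items = sib.items ++ [(q.1, pvRoot c q.2)] :=
      PySem.Dict.items_insert_of_not_contains sib _ (pvContainsFalse sib hfresh)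
    have hkeys' : (sib.insert q.1 (pvRoot c q.2)).keys = sib.keys ++ [q.1] :=
      PySem.Dict.keys_insert_of_not_contains sib _ (pvContainsFalse sib hfresh)
    have hstep : List.foldl
        (fun siblings bg =>
          let best :=
            match PySem.Dict.get? siblings bg.2 with
            | some b => b
            | none => pvAEnd c bg.2 (PySem.Dict.size c + 1);
          PySem.Dict.insert siblings bg.1 best)
        sib (q :: l)
        = List.foldl
        (fun siblings bg =>
          let best :=
            match PySem.Dict.get? siblings bg.2 with
            | some b => b
            | none => pvAEnd c bg.2 (PySem.Dict.size c + 1);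
          PySem.Dict.insert siblings bg.1 best)
        (sib.insert q.1
          (match PySem.Dict.get? sib q.2 with
            | some b => b
            | none => pvAEnd c q.2 (PySem.Dict.size c + 1))) l := rfl
    rw [hstep, hbest]
    rw [ih (sib.insert q.1 (pvRoot c q.2))
      (by
        intro k v h
        rw [PySem.Dict.get?_insert] at h
        by_cases hk : k = q.1
        · subst hk; rw [if_pos rfl] at h; injection h with hv; rw [← hv, hrootq]
        · rw [if_neg hk] at h; exact hmemo k v h)
      (fun p hp => hitems p (List.mem_cons_of_mem _ hp))
      (by
        rw [hkeys']
        simp only [List.map_cons] at hnodup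
        rw [List.append_assoc, List.singleton_append]
        exact hnodup),
      hitems']
    simp

theorem pvPhase2A (c : pvD) (rk : String → Nat) (hrk : pvRk c rk) (hnd : c.keys.Nodup) :
    (pvAPhase2 c).items = c.items.map (fun q => (q.1, pvRoot c q.2)) := by
  unfold pvAPhase2
  rw [pvPhase2Aux c rk hrk hnd c.items PySem.Dict.empty
    (by intro k v h; rw [PySem.Dict.get?_empty] at h; cases h)
    (fun q hq => hq)
    (by simpa [PySem.Dict.keys_empty, PySem.Dict.keys] using hnd)]
  exact List.nil_append _

-- ---- phase 2, B side ----
theorem pvPhase2BAux (P : pvD) (hndP : P.keys.Nodup) :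
    ∀ (l : List String) (par out : pvD) (rk : String → Nat),
      par.keys = P.keys → pvRk par rk →
      (∀ x, pvRoot par x = pvRoot P x) →
      ((out.keys ++ l).Nodup) →
      ((l.foldl
        (fun st bad =>
          let fr := pvBFind st.1 bad
          (fr.2, st.2.insert bad fr.1))
        (par, out)).2).items = out.items ++ l.map (fun b => (b, pvRoot P b)) := by
  intro l
  induction l with
  | nil => intro par out rk _ _ _ _; simp
  | cons bad l ih =>
    intro par out rk hkeys hrk hroot hnodup
    have hndpar : par.keys.Nodup := by rw [hkeys]; exact hndP
    have hval : pvCEnd par bad = pvRoot P bad := by rw [pvCEnd_eq]; exact hroot bad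
    have hfresh : bad ∉ out.keys := by
      intro hb
      exact (List.disjoint_of_nodup_append hnodup) hb List.mem_cons_self
    have hitems' : (out.insert bad (pvCEnd par bad)).items
        = out.items ++ [(bad, pvCEnd par bad)] :=
      PySem.Dict.items_insert_of_not_contains out _ (pvContainsFalse out hfresh)
    have hkeys' : (out.insert bad (pvCEnd par bad)).keys = out.keys ++ [bad] :=
      PySem.Dict.keys_insert_of_not_contains out _ (pvContainsFalse out hfresh)
    have hstep : List.foldl
        (fun st bad =>
          let fr := pvBFind st.1 bad
          (fr.2, PySem.Dict.insert st.2 bad fr.1))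
        (par, out) (bad :: l)
        = List.foldl
        (fun st bad =>
          let fr := pvBFind st.1 bad
          (fr.2, PySem.Dict.insert st.2 bad fr.1))
        (pvComp par bad, PySem.Dict.insert out bad (pvCEnd par bad)) l := rfl
    rw [hstep]
    rw [ih (pvComp par bad) (out.insert bad (pvCEnd par bad)) rk
      (by rw [pvComp_keys par rk hrk bad]; exact hkeys)
      (pvComp_rk par rk hrk bad)
      (by intro x; rw [pvComp_root par rk hrk hndpar bad x]; exact hroot x)
      (by rw [hkeys', List.append_assoc, List.singleton_append]; exact hnodup),
      hitems']
    simp [hval]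

-- ---- assembly ----
theorem pvMain (gs : List (List (String × String))) :
    CollapseTagSiblingPairs gs = CollapseTagSiblingPairs_alt gs := by
  simp only [CollapseTagSiblingPairs, CollapseTagSiblingPairs_alt]
  set C := gs.foldl (fun chains pairs =>
    (PySem.List.sorted2 pairs (fun q => q.1) (fun q => q.2)).foldl pvAStep chains)
    PySem.Dict.empty with hC
  set P := gs.foldl (fun par pairs =>
    (PySem.List.sorted2 pairs (fun q => q.1) (fun q => q.2)).foldl pvBStep par)
    PySem.Dict.empty with hP
  have hinv : pvInv C P := pvFoldGroups gs _ _ pvInvEmpty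
  obtain ⟨hkeys, hnd, ⟨rkc, hrkc⟩, ⟨rkp, hrkp⟩, hroot⟩ := hinv
  have hndP : P.keys.Nodup := by rw [← hkeys]; exact hnd
  -- A side
  rw [pvPhase2A C rkc hrkc hnd]
  -- B side
  rw [pvPhase2BAux P hndP P.keys P PySem.Dict.empty rkp rfl hrkp (fun _ => rfl)
    (by simpa [PySem.Dict.keys_empty] using hndP)]
  rw [show (PySem.Dict.empty : pvD).items = [] from rfl, List.nil_append]
  -- items → keys on the A side
  have h1 : C.items.map (fun q => (q.1, pvRoot C q.2))
      = C.items.map (fun q => (q.1, pvRoot C q.1)) := by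
    apply List.map_congr_left
    intro q hq
    have hcq : C.get? q.1 = some q.2 :=
      PySem.Dict.get?_of_mem_items C (by rw [Prod.mk.eta]; exact hq) hnd
    rw [pvRootStep C rkc hrkc hnd hcq]
  rw [h1]
  have h2 : C.items.map (fun q => (q.1, pvRoot C q.1))
      = C.keys.map (fun b => (b, pvRoot C b)) := by
    simp only [PySem.Dict.keys, List.map_map]
    rfl
  rw [h2, hkeys]
  apply List.map_congr_left
  intro b _
  rw [hroot b]

-- ===== VERDICT (by name: the statement is the Claim_ definition above) =====
theorem CollapseTagSiblingPairs_spec : Claim_equal_CollapseTagSiblingPairs := by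
  intro gs _
  unfold Spec_CollapseTagSiblingPairs
  exact pvMain gs
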